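-- pv_equiv track=rewrite | github.com/marcozecchini/hyperledger-automator | gen.py | createProfiles
-- ===== SOURCE A (Python) =====
-- def jumptab(number, number1):
--     i = 0
--     rslt = ""
--     while (i < number):
--         rslt = rslt + '\n'
--         i += 1
--     i = 0
--     while (i < number1):
--         rslt = rslt + "  "
--         i += 1
--     return (rslt)
--
-- def createProfiles(orgName, profileName, ordererName):
--     rslt = jumptab(0, 1) + profileName + ":"
--     #rslt += jumptab(1, 2) + "<<: *ChannelDefaults"
--     rslt += jumptab(1, 2) + "Orderer:"
--     rslt += jumptab(1, 3) + "<<: *OrdererDefaults"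
--     rslt += jumptab(1, 3) + "Organizations:"
--     rslt += jumptab(1, 4) + "- *" + ordererName
--     #rslt += jumptab(1, 3) + "Capabilities:"
--     #rslt += jumptab(1, 4) + "<<: *OrdererCapabilities"
--     rslt += jumptab(1, 2) + "Consortiums:"
--     rslt += jumptab(1, 3) + "ComposerConsortium:"
--     rslt += jumptab(1, 4) + "Organizations:"
--     i = 2
--     while (i < len(orgName)):
--         rslt += jumptab(1, 5) + "- *" + orgName[i]
--         i += 2
--     return (rslt)
-- ===== SOURCE B (Python) =====
-- def createProfiles(orgName, profileName, ordererName):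
--     rows = [(0, 1, profileName + ":"),
--             (1, 2, "Orderer:"),
--             (1, 3, "<<: *OrdererDefaults"),
--             (1, 3, "Organizations:"),
--             (1, 4, "- *" + ordererName),
--             (1, 2, "Consortiums:"),
--             (1, 3, "ComposerConsortium:"),
--             (1, 4, "Organizations:")]
--     rows += [(1, 5, "- *" + name)
--              for idx, name in enumerate(orgName) if idx >= 2 and idx % 2 == 0]
--     return "".join("\n" * nl + "  " * ind + text for nl, ind, text in rows)
-- ===== Notes on version B (the rewrite author's own statement) =====
-- stated objective: simpler
-- what changed: Replaces jumptab's char-by-char while loops and the stride-2 index while loop over orgName (which grows the result by repeated += concatenation) with a declarative (newlines, indent, text) row table (org rows selected by an enumerate filter on even indices >= 2) rendered in one str.join pass using string multiplication.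
import Mathlib
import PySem

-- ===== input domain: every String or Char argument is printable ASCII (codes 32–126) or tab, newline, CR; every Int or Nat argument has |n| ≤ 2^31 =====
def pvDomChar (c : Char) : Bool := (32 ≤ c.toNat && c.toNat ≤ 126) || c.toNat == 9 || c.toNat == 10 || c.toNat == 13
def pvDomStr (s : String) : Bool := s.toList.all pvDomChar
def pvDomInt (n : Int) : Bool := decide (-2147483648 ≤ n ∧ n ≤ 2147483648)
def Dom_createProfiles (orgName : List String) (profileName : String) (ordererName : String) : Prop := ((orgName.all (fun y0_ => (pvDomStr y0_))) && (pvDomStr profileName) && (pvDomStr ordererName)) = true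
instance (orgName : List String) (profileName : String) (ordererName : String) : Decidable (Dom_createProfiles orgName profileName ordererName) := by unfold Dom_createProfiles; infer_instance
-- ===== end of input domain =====

-- B builds a declarative (newlines, indent, text) row table and renders it by one uniform
-- join pass, replacing A's char-by-char jumptab while loops and the stride-2 index while
-- loop over orgName (objective: simpler); the return values agree on all inputs.

-- ===== PORT A =====
-- first while loop of jumptab: append '\n' while i < number
def jtNl (number : Int) (i : Int) (rslt : String) : String :=
  if i < number then jtNl number (i + 1) (rslt ++ "\n") else rslt
termination_by (number - i).toNat
decreasing_by omega

-- second while loop of jumptab: append "  " while i < number1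
def jtSp (number1 : Int) (i : Int) (rslt : String) : String :=
  if i < number1 then jtSp number1 (i + 1) (rslt ++ "  ") else rslt
termination_by (number1 - i).toNat
decreasing_by omega

def jumptab (number : Int) (number1 : Int) : String :=
  jtSp number1 0 (jtNl number 0 "")

-- the final while loop of createProfiles (i starts at 2, steps by 2; i is always a
-- nonnegative in-range index there, so a Nat index is exact)
def cpLoop (orgName : List String) (i : Nat) (rslt : String) : String :=
  if h : i < orgName.length then
    cpLoop orgName (i + 2) (rslt ++ jumptab 1 5 ++ "- *" ++ orgName[i])
  else rslt
termination_by orgName.length - i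

def createProfiles (orgName : List String) (profileName : String) (ordererName : String) : String :=
  let r0 := jumptab 0 1 ++ profileName ++ ":"
  let r1 := r0 ++ jumptab 1 2 ++ "Orderer:"
  let r2 := r1 ++ jumptab 1 3 ++ "<<: *OrdererDefaults"
  let r3 := r2 ++ jumptab 1 3 ++ "Organizations:"
  let r4 := r3 ++ jumptab 1 4 ++ "- *" ++ ordererName
  let r5 := r4 ++ jumptab 1 2 ++ "Consortiums:"
  let r6 := r5 ++ jumptab 1 3 ++ "ComposerConsortium:"
  let r7 := r6 ++ jumptab 1 4 ++ "Organizations:"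
  cpLoop orgName 2 r7

-- ===== PORT B =====
-- "\n" * nl + "  " * ind + text   for one table row
def rowStr (row : Nat × Nat × String) : String :=
  String.join (List.replicate row.1 "\n") ++ String.join (List.replicate row.2.1 "  ") ++ row.2.2

def baseRows (profileName : String) (ordererName : String) : List (Nat × Nat × String) :=
  [(0, 1, profileName ++ ":"),
   (1, 2, "Orderer:"),
   (1, 3, "<<: *OrdererDefaults"),
   (1, 3, "Organizations:"),
   (1, 4, "- *" ++ ordererName),
   (1, 2, "Consortiums:"),
   (1, 3, "ComposerConsortium:"),
   (1, 4, "Organizations:")]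

def createProfiles_alt (orgName : List String) (profileName : String) (ordererName : String) : String :=
  String.join
    ((baseRows profileName ordererName ++
      (orgName.zipIdx.filter (fun (p : String × Nat) => 2 ≤ p.2 && p.2 % 2 == 0)).map
        (fun (p : String × Nat) => (1, 5, "- *" ++ p.1))).map rowStr)

-- ===== PRECONDITION & SPEC =====
def Spec_createProfiles (orgName : List String) (profileName : String) (ordererName : String) (out : String) : Prop := out = createProfiles_alt orgName profileName ordererName
instance (orgName : List String) (profileName : String) (ordererName : String) (out : String) : Decidable (Spec_createProfiles orgName profileName ordererName out) := by unfold Spec_createProfiles; infer_instance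

-- ===== CLAIM (what is proved, stated in full; the proofs are below) =====
def Claim_equal_createProfiles : Prop := ∀ (orgName : List String) (profileName : String) (ordererName : String), Dom_createProfiles orgName profileName ordererName → Spec_createProfiles orgName profileName ordererName (createProfiles orgName profileName ordererName)

-- ===== LEMMAS AND PROOFS =====

-- every other element (indices 0, 2, 4, …) of a list
def everyOther : List String → List String
  | [] => []
  | [a] => [a]
  | a :: _ :: t => a :: everyOther t

set_option maxRecDepth 4000 in
theorem jt15 : jumptab 1 5 = "\n          " := by
  simp [jumptab, jtNl, jtSp]

theorem join_foldl (l : List String) (acc : String) :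
    List.foldl (· ++ ·) acc l = acc ++ String.join l := by
  induction l generalizing acc with
  | nil => simp [String.join]
  | cons a t ih =>
      rw [List.foldl_cons, ih]
      conv_rhs => rw [String.join, List.foldl_cons, ih]
      simp [String.append_assoc]

theorem join_cons (a : String) (l : List String) :
    String.join (a :: l) = a ++ String.join l := by
  rw [String.join, List.foldl_cons, join_foldl]; simp

theorem filt_eq (xs : List String) :
    ∀ k, 2 ≤ k → k % 2 = 0 →
      ((xs.zipIdx k).filter (fun p => 2 ≤ p.2 && p.2 % 2 == 0)).map
          (fun p => ((1 : Nat), (5 : Nat), "- *" ++ p.1))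
        = (everyOther xs).map (fun n => (1, 5, "- *" ++ n)) := by
  induction xs using everyOther.induct with
  | case1 => intro k _ _; simp [everyOther]
  | case2 a =>
      intro k h2 he
      simp [everyOther, List.zipIdx, List.filter, h2, he]
  | case3 a b t ih =>
      intro k h2 he
      have hodd : ¬ ((k + 1) % 2 = 0) := by omega
      have := ih (k + 2) (by omega) (by omega)
      simp only [List.zipIdx_cons, List.filter_cons, everyOther]
      rw [if_pos (by simp [h2, he]), if_neg (by simp [hodd])]
      simpa [Nat.add_assoc] using congrArg (List.cons ((1 : Nat), (5 : Nat), "- *" ++ a)) this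

theorem filt_top (xs : List String) :
    (xs.zipIdx.filter (fun p => 2 ≤ p.2 && p.2 % 2 == 0)).map
        (fun p => ((1 : Nat), (5 : Nat), "- *" ++ p.1))
      = (everyOther (xs.drop 2)).map (fun n => (1, 5, "- *" ++ n)) := by
  match xs with
  | [] => simp [everyOther]
  | [a] => simp [everyOther, List.zipIdx, List.filter]
  | a :: b :: t =>
      simp only [List.zipIdx_cons, List.filter_cons]
      norm_num
      exact filt_eq t 2 (by omega) (by omega)

theorem cpLoop_eq (xs : List String) :
    ∀ i r, cpLoop xs i r
      = r ++ String.join ((everyOther (xs.drop i)).map (fun n => jumptab 1 5 ++ "- *" ++ n)) := by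
  intro i
  induction hn : xs.length - i using Nat.strong_induction_on generalizing i with
  | _ n ih =>
    intro r
    rw [cpLoop]
    by_cases h : i < xs.length
    · rw [dif_pos h]
      have hdrop : xs.drop i = xs[i] :: xs.drop (i + 1) := List.drop_eq_getElem_cons h
      have hstep : everyOther (xs.drop i) = xs[i] :: everyOther (xs.drop (i + 2)) := by
        rw [hdrop]
        rcases h2 : xs.drop (i + 1) with _ | ⟨y, rest⟩
        · have h3 : xs.drop (i + 2) = [] := by
            have := congrArg (List.drop 1) h2
            rw [List.drop_drop] at this
            simpa [show 1 + (i + 1) = i + 2 by omega] using this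
          simp [everyOther, h3]
        · have h3 : xs.drop (i + 2) = rest := by
            have := congrArg (List.drop 1) h2
            rw [List.drop_drop] at this
            simpa [show 1 + (i + 1) = i + 2 by omega] using this
          simp [everyOther, h3]
      rw [ih (xs.length - (i + 2)) (by omega) (i + 2) rfl]
      rw [hstep]
      simp [List.map_cons, join_cons, String.append_assoc]
    · rw [dif_neg h]
      have h3 : xs.drop i = [] := List.drop_eq_nil_of_le (by omega)
      simp [h3, everyOther, String.join]

theorem rowTail_eq (n : String) :
    rowStr (1, 5, "- *" ++ n) = jumptab 1 5 ++ "- *" ++ n := by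
  simp [rowStr, jt15, String.join, List.replicate, ← String.append_assoc]

-- ===== VERDICT (by name: the statement is the Claim_ definition above) =====
set_option maxRecDepth 4000 in
theorem createProfiles_spec : Claim_equal_createProfiles := by
  intro og p o _
  unfold Spec_createProfiles createProfiles createProfiles_alt
  rw [cpLoop_eq]
  rw [filt_top]
  simp only [baseRows, List.cons_append, List.nil_append, List.map_cons, join_cons, List.map_map]
  have hmap : (fun n => rowStr ((1 : Nat), (5 : Nat), "- *" ++ n))
      = (fun n => jumptab 1 5 ++ "- *" ++ n) := funext fun n => rowTail_eq n
  simp only [Function.comp_def]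
  rw [hmap]
  rw [← String.toList_inj]
  simp [rowStr, jumptab, jtNl, jtSp, List.replicate, String.join, String.toList_append]
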